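-- pv_equiv track=rewrite | github.com/FabianAlvaradoDonoso/adventofcode | python/2023/solutions/day03.py | encontrar_numero
-- ===== SOURCE A (Python) =====
-- def encontrar_numero(lista, posicion):
--     # Verificar si la posición está dentro de los límites de la lista
--     if 0 <= posicion < len(lista) and lista[posicion].isdigit():
--         # Buscar hacia la izquierda desde la posición dada
--         inicio = posicion
--         while inicio >= 0 and lista[inicio].isdigit():
--             inicio -= 1
--
--         # Buscar hacia la derecha desde la posición dada
--         fin = posicion
--         while fin < len(lista) and lista[fin].isdigit():
--             fin += 1
--
--         # Devolver el número encontrado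
--         numero_completo = lista[inicio + 1 : fin]
--         return numero_completo
--
--     # Si la posición está fuera de los límites o no es un dígito, devolver None
--     return None
-- ===== SOURCE B (Python) =====
-- def encontrar_numero(lista, posicion):
--     # Single left-to-right pass: group maximal runs of digit elements and
--     # return the run that covers posicion (None if no run covers it).
--     start = 0
--     run = []
--     for i, x in enumerate(lista):
--         if x.isdigit():
--             if not run:
--                 start = i
--             run.append(x)
--         else:
--             if run and start <= posicion < i:
--                 return run
--             run = []
--     if run and start <= posicion < len(lista):
--         return run
--     return None
-- ===== Notes on version B (the rewrite author's own statement) =====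
-- stated objective: alternative
-- what changed: Replaces A's two-sided local expansion (left and right while-loops around posicion) by a single left-to-right pass over enumerate(lista) that groups maximal digit runs with (start, run) state and returns the run covering posicion.
import Mathlib
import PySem

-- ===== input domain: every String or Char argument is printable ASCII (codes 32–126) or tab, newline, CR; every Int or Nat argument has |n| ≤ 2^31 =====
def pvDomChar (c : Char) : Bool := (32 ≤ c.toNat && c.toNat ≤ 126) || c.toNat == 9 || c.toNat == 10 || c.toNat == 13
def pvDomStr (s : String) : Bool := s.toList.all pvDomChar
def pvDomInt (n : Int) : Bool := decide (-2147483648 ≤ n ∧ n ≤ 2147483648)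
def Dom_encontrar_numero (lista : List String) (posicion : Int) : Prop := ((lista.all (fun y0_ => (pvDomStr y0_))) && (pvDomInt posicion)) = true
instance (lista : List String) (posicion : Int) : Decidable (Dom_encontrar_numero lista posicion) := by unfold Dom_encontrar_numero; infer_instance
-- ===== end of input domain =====

-- B replaces A's two-sided local expansion around posicion by one left-to-right pass
-- that groups maximal digit runs and returns the run covering posicion (objective: alternative).

-- ===== PORT A =====
-- lista[i].isdigit() for an index the loops keep in range; pyGet? is some there, getD false is never taken
def pvDigitAt (lista : List String) (i : Int) : Bool :=
  (PySem.List.pyGet? lista i).map PySem.Str.strIsdigit |>.getD false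

-- while inicio >= 0 and lista[inicio].isdigit(): inicio -= 1
def pvLeft (lista : List String) (inicio : Int) : Int :=
  if 0 ≤ inicio ∧ pvDigitAt lista inicio = true then pvLeft lista (inicio - 1) else inicio
termination_by (inicio + 1).toNat
decreasing_by omega

-- while fin < len(lista) and lista[fin].isdigit(): fin += 1
def pvRight (lista : List String) (fin : Int) : Int :=
  if fin < (lista.length : Int) ∧ pvDigitAt lista fin = true then pvRight lista (fin + 1) else fin
termination_by ((lista.length : Int) - fin).toNat
decreasing_by omega

def encontrar_numero (lista : List String) (posicion : Int) : Option (List String) :=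
  if 0 ≤ posicion ∧ posicion < (lista.length : Int) ∧ pvDigitAt lista posicion = true then
    let inicio := pvLeft lista posicion
    let fin := pvRight lista posicion
    some (PySem.List.slice lista (some (inicio + 1)) (some fin))
  else none

-- ===== PORT B =====
-- the for-loop over enumerate(lista) with state (start, run) and early returns
def pvScan (n posicion : Int) : List (Int × String) → Int → List String → Option (List String)
  | [], start, run =>
      if run ≠ [] ∧ start ≤ posicion ∧ posicion < n then some run else none
  | (i, x) :: rest, start, run =>
      if PySem.Str.strIsdigit x = true then
        pvScan n posicion rest (if run = [] then i else start) (run ++ [x])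
      else if run ≠ [] ∧ start ≤ posicion ∧ posicion < i then some run
      else pvScan n posicion rest start []

def encontrar_numero_alt (lista : List String) (posicion : Int) : Option (List String) :=
  pvScan (lista.length : Int) posicion (PySem.List.enumerate lista) 0 []

-- ===== PRECONDITION & SPEC =====
def Spec_encontrar_numero (lista : List String) (posicion : Int) (out : Option (List String)) : Prop := out = encontrar_numero_alt lista posicion
instance (lista : List String) (posicion : Int) (out : Option (List String)) : Decidable (Spec_encontrar_numero lista posicion out) := by unfold Spec_encontrar_numero; infer_instance

-- ===== CLAIM (what is proved, stated in full; the proofs are below) =====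
def Claim_equal_encontrar_numero : Prop := ∀ (lista : List String) (posicion : Int), Dom_encontrar_numero lista posicion → Spec_encontrar_numero lista posicion (encontrar_numero lista posicion)

-- ===== LEMMAS AND PROOFS =====

-- digit test at a Nat index
def pvD (lista : List String) (k : Nat) : Bool := pvDigitAt lista (k : Int)

theorem pvD_eq (lista : List String) (k : Nat) :
    pvD lista k = ((lista[k]?).map PySem.Str.strIsdigit).getD false := by
  simp [pvD, pvDigitAt]

theorem pvDigitAt_natCast (lista : List String) (k : Nat) :
    pvDigitAt lista (k : Int) = pvD lista k := rfl

-- the left scan stops just below a maximal digit block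
theorem pvLeft_spec (lista : List String) (s : Nat) :
    (s = 0 ∨ pvD lista (s - 1) = false) →
    ∀ (m i : Nat), s + m = i → (∀ j, s ≤ j → j ≤ i → pvD lista j = true) →
    pvLeft lista (i : Int) = (s : Int) - 1 := by
  intro hs m
  induction m with
  | zero =>
      intro i hi hall
      subst hi; simp only [Nat.add_zero]
      rw [pvLeft]
      rw [if_pos ⟨by positivity, by simpa [pvDigitAt_natCast] using hall s le_rfl le_rfl⟩]
      rcases hs with h0 | hds
      · subst h0
        rw [pvLeft, if_neg (by rintro ⟨h, -⟩; omega)]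
      · have hs0 : 0 < s := by
          rcases Nat.eq_zero_or_pos s with h | h
          · subst h; simp [hall 0 le_rfl le_rfl] at hds
          · exact h
        have h1 : (s : Int) - 1 = ((s - 1 : Nat) : Int) := by omega
        rw [h1, pvLeft, if_neg (by
          rintro ⟨-, hd⟩
          rw [pvDigitAt_natCast] at hd
          exact absurd hd (by simp [hds]))]
  | succ m ih =>
      intro i hi hall
      rw [pvLeft, if_pos ⟨by omega, by simpa [pvDigitAt_natCast] using hall i (by omega) le_rfl⟩]
      have h1 : (i : Int) - 1 = ((s + m : Nat) : Int) := by omega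
      rw [h1]
      exact ih (s + m) rfl (fun j h1 h2 => hall j h1 (by omega))

-- the right scan stops at the end of a maximal digit block
theorem pvRight_spec (lista : List String) (e : Nat) (he : e ≤ lista.length)
    (hende : e = lista.length ∨ pvD lista e = false) :
    ∀ (m i : Nat), i + m = e → (∀ j, i ≤ j → j < e → pvD lista j = true) →
    pvRight lista (i : Int) = (e : Int) := by
  intro m
  induction m with
  | zero =>
      intro i hi hall
      have : i = e := by omega
      subst this
      rw [pvRight, if_neg]
      rintro ⟨h1, h2⟩
      rcases hende with h | h
      · omega
      · rw [pvDigitAt_natCast] at h2; exact absurd h2 (by simp [h])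
  | succ m ih =>
      intro i hi hall
      rw [pvRight, if_pos ⟨by omega, by simpa [pvDigitAt_natCast] using hall i le_rfl (by omega)⟩]
      have h1 : (i : Int) + 1 = ((i + 1 : Nat) : Int) := by omega
      rw [h1]
      exact ih (i + 1) (by omega) (fun j hj1 hj2 => hall j (by omega) hj2)

-- run extension: take one more element of the block
theorem pvTake_succ (lista : List String) (s k : Nat) (hsk : s ≤ k) (hk : k < lista.length) :
    (lista.drop s).take (k - s) ++ [lista[k]] = (lista.drop s).take (k - s + 1) := by
  rw [List.take_succ]
  have h1 : (lista.drop s)[k - s]? = some lista[k] := by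
    rw [List.getElem?_drop]
    have : s + (k - s) = k := by omega
    rw [this, List.getElem?_eq_getElem hk]
  simp [h1]

theorem pvDrop_cons (lista : List String) (k : Nat) (hk : k < lista.length) :
    lista.drop k = lista[k] :: lista.drop (k + 1) :=
  List.drop_eq_getElem_cons hk

-- scanning inside the digit block [s, e) returns the whole block
theorem pvScan_inside (lista : List String) (p : Int) (s e : Nat)
    (he : e ≤ lista.length) (hsp : (s : Int) ≤ p) (hpe : p < (e : Int))
    (hall : ∀ j, s ≤ j → j < e → pvD lista j = true)
    (hende : e = lista.length ∨ pvD lista e = false) :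
    ∀ (m k : Nat), k + m = e → s < k →
    pvScan (lista.length : Int) p (PySem.List.enumerate (lista.drop k) (k : Int)) (s : Int)
      ((lista.drop s).take (k - s))
      = some ((lista.drop s).take (e - s)) := by
  intro m
  induction m with
  | zero =>
      intro k hk hsk
      have hke : k = e := by omega
      subst hke
      have hrun : (lista.drop s).take (k - s) ≠ [] := by
        have hlen : (lista.drop s).length = lista.length - s := by simp
        have : ((lista.drop s).take (k - s)).length = k - s := by
          rw [List.length_take, hlen]; omega
        intro hnil; rw [hnil] at this; simp at this; omega
      by_cases hel : k = lista.length
      · rw [hel, List.drop_length]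
        simp only [PySem.List.enumerate_nil, pvScan]
        rw [if_pos ⟨by rw [← hel]; exact hrun, hsp, by omega⟩]
      · have hklen : k < lista.length := by omega
        have h : pvD lista k = false := by
          rcases hende with h | h
          · omega
          · exact h
        conv_lhs => rw [pvDrop_cons lista k hklen, PySem.List.enumerate_cons]
        rw [pvScan]
        rw [if_neg (by rw [pvD_eq, List.getElem?_eq_getElem hklen] at h; simpa using h)]
        rw [if_pos ⟨hrun, by omega, by omega⟩]
  | succ m ih =>
      intro k hk hsk
      have hklen : k < lista.length := by omega
      have hdk : PySem.Str.strIsdigit lista[k] = true := by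
        have := hall k (by omega) (by omega)
        rwa [pvD_eq, List.getElem?_eq_getElem hklen, Option.map_some, Option.getD_some] at this
      rw [pvDrop_cons lista k hklen, PySem.List.enumerate_cons, pvScan, if_pos hdk]
      have hrun : (lista.drop s).take (k - s) ≠ [] := by
        have hlen : (lista.drop s).length = lista.length - s := by simp
        have : ((lista.drop s).take (k - s)).length = k - s := by
          rw [List.length_take, hlen]; omega
        intro hnil; rw [hnil] at this; simp at this; omega
      rw [if_neg hrun, pvTake_succ lista s k (by omega) hklen]
      have h1 : (k : Int) + 1 = ((k + 1 : Nat) : Int) := by omega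
      have h2 : k - s + 1 = k + 1 - s := by omega
      rw [h1, h2]
      exact ih (k + 1) (by omega) (by omega)

-- scanning before the block reaches it with an empty run
theorem pvScan_before (lista : List String) (p : Int) (s e : Nat)
    (he : e ≤ lista.length) (hsp : (s : Int) ≤ p) (hpe : p < (e : Int)) (hse : s < e)
    (hall : ∀ j, s ≤ j → j < e → pvD lista j = true)
    (hs : s = 0 ∨ pvD lista (s - 1) = false)
    (hende : e = lista.length ∨ pvD lista e = false) :
    ∀ (m k : Nat) (start : Int) (run : List String), k + m = s →
    (run = [] ∨ (0 < k ∧ pvD lista (k - 1) = true)) →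
    pvScan (lista.length : Int) p (PySem.List.enumerate (lista.drop k) (k : Int)) start run
      = some ((lista.drop s).take (e - s)) := by
  intro m
  induction m with
  | zero =>
      intro k start run hk hinv
      have hks : k = s := by omega
      subst hks
      have hrun : run = [] := by
        rcases hinv with h | ⟨hk0, hd⟩
        · exact h
        · rcases hs with h0 | h0
          · omega
          · exact absurd hd (by simp [h0])
      subst hrun
      have hklen : k < lista.length := by omega
      have hdk : PySem.Str.strIsdigit lista[k] = true := by
        have := hall k le_rfl hse
        rwa [pvD_eq, List.getElem?_eq_getElem hklen, Option.map_some, Option.getD_some] at this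
      conv_lhs => rw [pvDrop_cons lista k hklen, PySem.List.enumerate_cons]
      rw [pvScan, if_pos hdk, if_pos rfl]
      have h1 : (k : Int) + 1 = ((k + 1 : Nat) : Int) := by omega
      have h2 : ([] : List String) ++ [lista[k]] = (lista.drop k).take (k + 1 - k) := by
        have := pvTake_succ lista k k le_rfl hklen
        simpa using this
      rw [h1, h2]
      exact pvScan_inside lista p k e he hsp hpe hall hende (e - (k + 1)) (k + 1) (by omega) (by omega)
  | succ m ih =>
      intro k start run hk hinv
      have hklen : k < lista.length := by omega
      rw [pvDrop_cons lista k hklen, PySem.List.enumerate_cons, pvScan]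
      have h1 : (k : Int) + 1 = ((k + 1 : Nat) : Int) := by omega
      by_cases hdk : PySem.Str.strIsdigit lista[k] = true
      · rw [if_pos hdk, h1]
        refine ih (k + 1) _ _ (by omega) (Or.inr ⟨by omega, ?_⟩)
        simp only [Nat.add_sub_cancel]
        rw [pvD_eq, List.getElem?_eq_getElem hklen]
        simpa using hdk
      · rw [if_neg hdk, if_neg (by rintro ⟨-, -, hlt⟩; omega), h1]
        exact ih (k + 1) start [] (by omega) (Or.inl rfl)

-- when the guard fails no run ever covers posicion: scan returns none
theorem pvScan_none (lista : List String) (p : Int)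
    (hguard : ¬ (0 ≤ p ∧ p < (lista.length : Int) ∧ pvDigitAt lista p = true)) :
    ∀ (m k : Nat) (start : Int) (run : List String), k + m = lista.length →
    (run ≠ [] → ∃ st : Nat, start = (st : Int) ∧ st ≤ k ∧ ∀ j, st ≤ j → j < k → pvD lista j = true) →
    pvScan (lista.length : Int) p (PySem.List.enumerate (lista.drop k) (k : Int)) start run = none := by
  intro m
  induction m with
  | zero =>
      intro k start run hk hinv
      have hks : k = lista.length := by omega
      subst hks
      rw [List.drop_length]
      simp only [PySem.List.enumerate_nil, pvScan]
      rw [if_neg]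
      rintro ⟨hne, hsp, hpn⟩
      obtain ⟨st, rfl, hstk, hall⟩ := hinv hne
      have hp0 : 0 ≤ p := le_trans (by positivity) hsp
      have hplt : p.toNat < lista.length := by omega
      have hd : pvD lista p.toNat = true := hall p.toNat (by omega) hplt
      exact hguard ⟨hp0, by omega, by rw [← Int.toNat_of_nonneg hp0]; exact hd⟩
  | succ m ih =>
      intro k start run hk hinv
      have hklen : k < lista.length := by omega
      rw [pvDrop_cons lista k hklen, PySem.List.enumerate_cons, pvScan]
      have h1 : (k : Int) + 1 = ((k + 1 : Nat) : Int) := by omega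
      by_cases hdk : PySem.Str.strIsdigit lista[k] = true
      · rw [if_pos hdk, h1]
        refine ih (k + 1) _ _ (by omega) (fun _ => ?_)
        have hdkD : pvD lista k = true := by
          rw [pvD_eq, List.getElem?_eq_getElem hklen]
          simpa using hdk
        by_cases hrun : run = []
        · rw [if_pos hrun]
          exact ⟨k, rfl, by omega, fun j hj1 hj2 => by
            have : j = k := by omega
            subst this; exact hdkD⟩
        · rw [if_neg hrun]
          obtain ⟨st, rfl, hstk, hall⟩ := hinv hrun
          exact ⟨st, rfl, by omega, fun j hj1 hj2 => by
            rcases Nat.lt_or_ge j k with h | h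
            · exact hall j hj1 h
            · have : j = k := by omega
              subst this; exact hdkD⟩
      · rw [if_neg hdk, if_neg, h1]
        · exact ih (k + 1) start [] (by omega) (by simp)
        · rintro ⟨hne, hsp, hpk⟩
          obtain ⟨st, rfl, hstk, hall⟩ := hinv hne
          have hp0 : 0 ≤ p := le_trans (by positivity) hsp
          have hplt : p.toNat < k := by omega
          exact hguard ⟨hp0, by omega,
            by rw [← Int.toNat_of_nonneg hp0]; exact hall p.toNat (by omega) hplt⟩

-- existence of the maximal digit block around a digit position
theorem pvExists_left (lista : List String) :
    ∀ (pn : Nat), pvD lista pn = true →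
    ∃ s, s ≤ pn ∧ (∀ j, s ≤ j → j ≤ pn → pvD lista j = true) ∧ (s = 0 ∨ pvD lista (s - 1) = false) := by
  intro pn
  induction pn with
  | zero =>
      intro hd
      refine ⟨0, le_rfl, fun j h1 h2 => ?_, Or.inl rfl⟩
      have hj : j = 0 := by omega
      subst hj; exact hd
  | succ pn ih =>
      intro hd
      by_cases hprev : pvD lista pn = true
      · obtain ⟨s, hs1, hs2, hs3⟩ := ih hprev
        refine ⟨s, by omega, fun j h1 h2 => ?_, hs3⟩
        rcases Nat.lt_or_ge j (pn + 1) with h | h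
        · exact hs2 j h1 (by omega)
        · have hj : j = pn + 1 := by omega
          subst hj; exact hd
      · refine ⟨pn + 1, le_rfl, fun j h1 h2 => ?_, Or.inr (by simpa using Bool.eq_false_iff.mpr hprev)⟩
        have hj : j = pn + 1 := by omega
        subst hj; exact hd

theorem pvExists_right (lista : List String) :
    ∀ (m pn : Nat), pn < lista.length → lista.length - pn ≤ m → pvD lista pn = true →
    ∃ e, pn < e ∧ e ≤ lista.length ∧ (∀ j, pn ≤ j → j < e → pvD lista j = true) ∧
      (e = lista.length ∨ pvD lista e = false) := by
  intro m
  induction m with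
  | zero => intro pn h1 h2 _; omega
  | succ m ih =>
      intro pn hlen hm hd
      by_cases hend : pn + 1 = lista.length
      · refine ⟨pn + 1, by omega, by omega, fun j h1 h2 => ?_, Or.inl hend⟩
        have hj : j = pn := by omega
        subst hj; exact hd
      · by_cases hnext : pvD lista (pn + 1) = true
        · obtain ⟨e, he1, he2, he3, he4⟩ := ih (pn + 1) (by omega) (by omega) hnext
          refine ⟨e, by omega, he2, fun j h1 h2 => ?_, he4⟩
          rcases Nat.lt_or_ge j (pn + 1) with h | h
          · have hj : j = pn := by omega
            subst hj; exact hd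
          · exact he3 j h h2
        · refine ⟨pn + 1, by omega, by omega, fun j h1 h2 => ?_,
            Or.inr (Bool.eq_false_iff.mpr hnext)⟩
          have hj : j = pn := by omega
          subst hj; exact hd

-- ===== VERDICT (by name: the statement is the Claim_ definition above) =====
theorem encontrar_numero_spec : Claim_equal_encontrar_numero := by
  intro lista p _
  unfold Spec_encontrar_numero encontrar_numero encontrar_numero_alt
  have hdrop0 : PySem.List.enumerate lista = PySem.List.enumerate (lista.drop 0) ((0 : Nat) : Int) := by
    simp
  by_cases hguard : 0 ≤ p ∧ p < (lista.length : Int) ∧ pvDigitAt lista p = true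
  · rw [if_pos hguard]
    obtain ⟨hp0, hplen, hpd⟩ := hguard
    set pn := p.toNat with hpn
    have hpcast : p = (pn : Int) := by omega
    have hpdn : pvD lista pn = true := by rwa [pvD, ← hpcast]
    obtain ⟨s, hs1, hs2, hs3⟩ := pvExists_left lista pn hpdn
    obtain ⟨e, he1, he2, he3, he4⟩ :=
      pvExists_right lista (lista.length - pn) pn (by omega) le_rfl hpdn
    have hleft : pvLeft lista p = (s : Int) - 1 := by
      rw [hpcast]
      exact pvLeft_spec lista s hs3 (pn - s) pn (by omega) hs2
    have hright : pvRight lista p = (e : Int) := by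
      rw [hpcast]
      exact pvRight_spec lista e he2 he4 (e - pn) pn (by omega) he3
    rw [hleft, hright]
    have hall : ∀ j, s ≤ j → j < e → pvD lista j = true := by
      intro j h1 h2
      rcases Nat.lt_or_ge pn j with h | h
      · exact he3 j (by omega) h2
      · exact hs2 j h1 h
    rw [hdrop0]
    rw [pvScan_before lista p s e he2 (by omega) (by omega) (by omega) hall hs3 he4 s 0 0 []
          (by omega) (Or.inl rfl)]
    show some (PySem.List.slice lista (some ((s : Int) - 1 + 1)) (some (e : Int))) = _
    have hsl : (s : Int) - 1 + 1 = (s : Int) := by ring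
    rw [hsl, PySem.List.slice_natCast]
  · rw [if_neg hguard, hdrop0]
    rw [pvScan_none lista p hguard lista.length 0 0 [] (by omega) (by simp)]
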